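-- pv_equiv track=rewrite | github.com/letiBri/esercizi_ricorsione | quadratoMagico.py | verifica_colonne
-- ===== SOURCE A (Python) =====
-- def verifica_colonne(parziale, N):
--     lista_colonne = []
--     for col in range(N):
--         somma_colonne = 0
--         for r in range(N):
--             indice = col + N*r
--             somma_colonne += parziale[indice]
--         lista_colonne.append(somma_colonne)
--     for i in range(1, len(lista_colonne)):
--         if lista_colonne[i] != lista_colonne[i-1]:
--             return False
--     return True
-- ===== SOURCE B (Python) =====
-- def verifica_colonne(parziale, N):
--     sums = [0] * N
--     for r in range(N):
--         row = parziale[r*N:(r+1)*N]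
--         sums = [s + x for s, x in zip(sums, row)]
--     return all(s == sums[0] for s in sums)
-- ===== Notes on version B (the rewrite author's own statement) =====
-- stated objective: alternative
-- what changed: Replaces A's column-outer nested loops with arithmetic stride indexing (parziale[col+N*r]) and its adjacent-pair equality scan by a single pass over the N row slices accumulating an element-wise vector of column sums, finished by an all-equal-to-first check.
-- outside the precondition, e.g. on verifica_colonne([1, 2, 3], 2): A raises IndexError, B returns True
import Mathlib
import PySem

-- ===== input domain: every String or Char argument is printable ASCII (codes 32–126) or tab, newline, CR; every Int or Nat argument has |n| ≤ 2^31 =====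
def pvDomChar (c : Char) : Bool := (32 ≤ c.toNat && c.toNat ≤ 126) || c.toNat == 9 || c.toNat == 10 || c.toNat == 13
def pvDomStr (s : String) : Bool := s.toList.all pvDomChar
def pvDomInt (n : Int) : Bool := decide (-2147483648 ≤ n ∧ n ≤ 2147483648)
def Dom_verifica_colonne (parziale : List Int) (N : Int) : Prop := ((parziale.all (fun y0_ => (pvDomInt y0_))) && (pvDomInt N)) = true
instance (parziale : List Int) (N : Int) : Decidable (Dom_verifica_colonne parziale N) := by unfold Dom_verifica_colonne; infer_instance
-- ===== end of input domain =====

-- B replaces A's column-outer stride-indexed nested loops by a single pass over the N row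
-- slices with an element-wise vector accumulator, then an all-equal-to-first check
-- (objective: alternative traversal, same cost).

-- ===== PORT A =====
-- the trailing loop 'for i in range(1, len(lista)): if lista[i] != lista[i-1]: return False'
def pvCheckAdj (l : List Int) : List Int → Bool
  | [] => true
  | i :: rest =>
      if PySem.List.pyGetD l i 0 ≠ PySem.List.pyGetD l (i - 1) 0 then false
      else pvCheckAdj l rest

def verifica_colonne (parziale : List Int) (N : Int) : Bool :=
  let lista := (PySem.List.pyRange 0 N 1).foldl (fun acc col =>
      acc ++ [(PySem.List.pyRange 0 N 1).foldl
        (fun s r => s + PySem.List.pyGetD parziale (col + N * r) 0) 0]) []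
  pvCheckAdj lista (PySem.List.pyRange 1 lista.length 1)

-- ===== PORT B =====
def verifica_colonne_alt (parziale : List Int) (N : Int) : Bool :=
  let sums := (PySem.List.pyRange 0 N 1).foldl
    (fun sums r => List.zipWith (fun s x => s + x) sums
        (PySem.List.slice parziale (some (r * N)) (some ((r + 1) * N))))
    (List.replicate N.toNat 0)
  match sums with
  | [] => true
  | s0 :: _ => sums.all (fun s => s == s0)

-- ===== PRECONDITION & SPEC =====
-- Pre_ excludes exactly the inputs where A raises IndexError: 0 < N but fewer than N*N entries.
def Pre_verifica_colonne (parziale : List Int) (N : Int) : Prop :=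
  N ≤ 0 ∨ N * N ≤ (parziale.length : Int)
instance (parziale : List Int) (N : Int) : Decidable (Pre_verifica_colonne parziale N) := by
  unfold Pre_verifica_colonne; infer_instance

def pvWitness_verifica_colonne : List Int × Int := ([1, 2, 1, 2], 2)

def Spec_verifica_colonne (parziale : List Int) (N : Int) (out : Bool) : Prop := out = verifica_colonne_alt parziale N
instance (parziale : List Int) (N : Int) (out : Bool) : Decidable (Spec_verifica_colonne parziale N out) := by unfold Spec_verifica_colonne; infer_instance

-- ===== CLAIM (what is proved, stated in full; the proofs are below) =====
def Claim_equal_verifica_colonne : Prop := ∀ (parziale : List Int) (N : Int), Dom_verifica_colonne parziale N → Pre_verifica_colonne parziale N → Spec_verifica_colonne parziale N (verifica_colonne parziale N)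

-- ===== LEMMAS AND PROOFS =====
def pvS (p : List Int) (n c : ℕ) : Int :=
  ((List.range n).map (fun r => p.getD (r * n + c) 0)).sum

theorem pvCheckAdj_eq_all (l : List Int) (idx : List Int) :
    pvCheckAdj l idx = idx.all (fun i => PySem.List.pyGetD l i 0 == PySem.List.pyGetD l (i - 1) 0) := by
  induction idx with
  | nil => rfl
  | cons i rest ih =>
    simp only [pvCheckAdj, List.all_cons]
    by_cases h : PySem.List.pyGetD l i 0 = PySem.List.pyGetD l (i - 1) 0
    · simp [h, ih]
    · simp [h]

theorem pvA_list (p : List Int) (n : ℕ) :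
    (PySem.List.pyRange 0 (n : Int) 1).foldl (fun acc col =>
        acc ++ [(PySem.List.pyRange 0 (n : Int) 1).foldl
          (fun s r => s + PySem.List.pyGetD p (col + (n : Int) * r) 0) 0]) []
      = (List.range n).map (fun c => pvS p n c) := by
  rw [PySem.List.pyRange_one, PySem.List.foldl_append_singleton_eq_map]
  simp only [Int.sub_zero, Int.toNat_natCast, List.nil_append, List.map_map]
  apply List.map_congr_left
  intro c hc
  simp only [Function.comp]
  rw [PySem.List.foldl_add]
  simp only [zero_add, List.map_map]
  unfold pvS
  congr 1
  apply List.map_congr_left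
  intro r hr
  have h : (0:Int) + (c:Int) + (n:Int) * ((0:Int) + (r:Int)) = ((r * n + c : ℕ) : Int) := by
    push_cast; ring
  simp only [Function.comp_apply, zero_add] at h ⊢
  rw [h, PySem.List.pyGetD_natCast]

theorem pvRow (p : List Int) (n k : ℕ) (h : (k + 1) * n ≤ p.length) :
    PySem.List.slice p (some ((k : Int) * (n : Int))) (some (((k : Int) + 1) * (n : Int)))
      = (List.range n).map (fun c => p.getD (k * n + c) 0) := by
  have h1 : ((k : Int) * (n : Int)) = ((k * n : ℕ) : Int) := by push_cast; ring
  have h2 : (((k : Int) + 1) * (n : Int)) = (((k + 1) * n : ℕ) : Int) := by push_cast; ring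
  rw [h1, h2, PySem.List.slice_natCast]
  have e : (k + 1) * n = k * n + n := by ring
  apply List.ext_getElem
  · simp [e]; omega
  · intro i hi1 hi2
    have hlt : k * n + i < p.length := by
      simp [e] at hi1; omega
    simp [List.getD_eq_getElem?_getD, List.getElem?_eq_getElem hlt]

theorem pvB_fold (p : List Int) (n : ℕ) (k : ℕ) :
    (List.range k).foldl (fun sums r =>
        List.zipWith (fun s x => s + x) sums ((List.range n).map (fun c => p.getD (r * n + c) 0)))
      ((List.range n).map (fun _ => (0 : Int)))
    = (List.range n).map (fun c => ((List.range k).map (fun r => p.getD (r * n + c) 0)).sum) := by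
  induction k with
  | zero => simp
  | succ m ih =>
    rw [List.range_succ, List.foldl_append, ih]
    simp [List.zipWith_map, List.map_append]

theorem pvChain (n : ℕ) (f : ℕ → Int) (h : ∀ k, k + 1 < n → f (k + 1) = f k) :
    ∀ c, c < n → f c = f 0 := by
  intro c
  induction c with
  | zero => intro _; rfl
  | succ m ih => intro hc; rw [h m hc, ih (by omega)]

theorem pvFinal (m : ℕ) (f : ℕ → Int) :
    pvCheckAdj ((List.range (m + 1)).map f) (PySem.List.pyRange 1 ((m + 1 : ℕ) : Int) 1)
      = (match (List.range (m + 1)).map f with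
         | [] => true
         | s0 :: _ => ((List.range (m + 1)).map f).all (fun s => s == s0)) := by
  have hL : (List.range (m + 1)).map f = f 0 :: ((List.range m).map (fun j => f (j + 1))) := by
    rw [List.range_succ_eq_map]
    simp [List.map_map, Function.comp]
  rw [pvCheckAdj_eq_all, hL, Bool.eq_iff_iff]
  simp only [List.all_eq_true, List.mem_cons, List.mem_map, List.mem_range,
    PySem.List.mem_pyRange_one, beq_iff_eq]
  constructor
  · intro h
    have hch : ∀ c, c < m + 1 → f c = f 0 := by
      apply pvChain
      intro j hj
      have h1 : (1 : Int) ≤ ((j : Int) + 1) := by omega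
      have h2 : ((j : Int) + 1) < ((m + 1 : ℕ) : Int) := by push_cast; omega
      have this := h ((j : Int) + 1) ⟨h1, h2⟩
      rw [show ((j : Int) + 1) = ((j + 1 : ℕ) : Int) by push_cast; ring] at this
      rw [show (((j + 1 : ℕ) : Int) - 1) = ((j : ℕ) : Int) by push_cast; ring] at this
      rw [PySem.List.pyGetD_natCast, PySem.List.pyGetD_natCast] at this
      rcases j with _ | j'
      · rw [List.getD_cons_succ, List.getD_cons_zero,
          PySem.List.getD_map_range _ _ _ _ (by omega : 0 < m)] at this
        exact this
      · have hj1 : j' + 1 < m := by omega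
        have hj2 : j' < m := by omega
        rw [List.getD_cons_succ, List.getD_cons_succ,
          PySem.List.getD_map_range _ _ _ _ hj1, PySem.List.getD_map_range _ _ _ _ hj2] at this
        exact this
    intro s hs
    rcases hs with h0 | ⟨j, hj, rfl⟩
    · exact h0
    · exact hch (j + 1) (by omega)
  · intro h i hi
    have hall : ∀ c, c < m + 1 → f c = f 0 := by
      intro c hc
      rcases c with _ | c'
      · rfl
      · exact h (f (c' + 1)) (Or.inr ⟨c', by omega, rfl⟩)
    obtain ⟨j, rfl, hj⟩ : ∃ j : ℕ, i = ((j + 1 : ℕ) : Int) ∧ j < m := by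
      refine ⟨(i - 1).toNat, by omega, by omega⟩
    have e2 : (((j + 1 : ℕ) : Int) - 1) = ((j : ℕ) : Int) := by push_cast; ring
    rw [e2, PySem.List.pyGetD_natCast, PySem.List.pyGetD_natCast,
      List.getD_cons_succ, PySem.List.getD_map_range _ _ _ _ hj]
    rcases j with _ | j'
    · simp [hall 1 (by omega)]
    · rw [List.getD_cons_succ, PySem.List.getD_map_range _ _ _ _ (by omega : j' < m)]
      rw [hall (j' + 1 + 1) (by omega), hall (j' + 1) (by omega)]


-- ===== VERDICT (by name: the statement is the Claim_ definition above) =====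
theorem verifica_colonne_spec : Claim_equal_verifica_colonne := by
  intro p N _ hpre
  unfold Spec_verifica_colonne

  simp only [verifica_colonne, verifica_colonne_alt]
  by_cases hN : N ≤ 0
  · rw [PySem.List.pyRange_one_eq_nil (by omega : N ≤ 0)]
    simp [pvCheckAdj, PySem.List.pyRange_one_eq_nil, Int.toNat_of_nonpos hN]
  · rw [Int.not_le] at hN
    obtain ⟨n, rfl⟩ : ∃ n : ℕ, N = (n : Int) := ⟨N.toNat, (Int.toNat_of_nonneg (le_of_lt hN)).symm⟩
    have hn : 0 < n := by exact_mod_cast hN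
    have hlen : n * n ≤ p.length := by
      rcases hpre with h | h
      · omega
      · exact_mod_cast h
    have hB : (PySem.List.pyRange 0 (n : Int) 1).foldl
        (fun sums r => List.zipWith (fun s x => s + x) sums
          (PySem.List.slice p (some (r * (n : Int))) (some ((r + 1) * (n : Int)))))
        (List.replicate n 0)
        = (List.range n).map (fun c => pvS p n c) := by
      rw [PySem.List.pyRange_one]
      simp only [Int.sub_zero, Int.toNat_natCast]
      rw [List.foldl_map]
      rw [PySem.List.foldl_congr_mem
        (g := fun sums (k : ℕ) => List.zipWith (fun s x => s + x) sums
          ((List.range n).map (fun c => p.getD (k * n + c) 0)))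
        (h := by
          intro sums k hk
          have hkn : k < n := List.mem_range.mp hk
          have hb : (k + 1) * n ≤ p.length :=
            le_trans (Nat.mul_le_mul_right n (by omega)) hlen
          simp only [zero_add]
          rw [pvRow p n k hb])]
      rw [show List.replicate n (0 : Int) = (List.range n).map (fun _ => (0 : Int)) by simp]
      rw [pvB_fold p n n]
      rfl
    simp only [Int.toNat_natCast]
    rw [pvA_list p n, hB]
    rw [show ((List.range n).map (fun c => pvS p n c)).length = n by simp]
    obtain ⟨m, rfl⟩ : ∃ m : ℕ, n = m + 1 := ⟨n - 1, by omega⟩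
    exact pvFinal m (fun c => pvS p (m + 1) c)
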